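-- pv_equiv track=rewrite | github.com/fernandacaron/pynnotate | pynnotate/main/main.py | filter_largest_fragment
-- ===== SOURCE A (Python) =====
-- def filter_largest_fragment(gene_dict, header_to_species=None):
--
-- 	from collections import defaultdict
--
-- 	new_dict = {}
-- 	for gene, entries in gene_dict.items():
-- 		by_key = defaultdict(list)
-- 		for header, seq, original_id in entries:
-- 			key = (
-- 				header_to_species.get(header)
-- 				if header_to_species
-- 				else header
-- 			)
-- 			if key:
-- 				by_key[key].append((header, seq, original_id))
--
-- 		new_dict[gene] = []
-- 		for group in by_key.values():
-- 			largest = max(group, key=lambda x: len(x[1]))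
-- 			new_dict[gene].append(largest)
--
-- 	return new_dict
-- ===== SOURCE B (Python) =====
-- def filter_largest_fragment(gene_dict, header_to_species=None):
--
-- 	def key_of(header):
-- 		return header_to_species.get(header) if header_to_species else header
--
-- 	result = {}
-- 	for gene, entries in gene_dict.items():
-- 		keys = [k for k in (key_of(h) for h, _, _ in entries) if k]
-- 		result[gene] = [
-- 			max((e for e in entries if key_of(e[0]) == k),
-- 				key=lambda x: len(x[1]))
-- 			for k in dict.fromkeys(keys)
-- 		]
-- 	return result
-- ===== Notes on version B (the rewrite author's own statement) =====
-- stated objective: alternative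
-- what changed: Replaces A's incremental defaultdict grouping (one pass appending every entry into per-key lists, then max of each list) by a declarative form: compute the truthy keys in first-occurrence order via dict.fromkeys, and for each such key take the max directly over a filter of the gene's entries with that key - no grouping structure is built.
import Mathlib
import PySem

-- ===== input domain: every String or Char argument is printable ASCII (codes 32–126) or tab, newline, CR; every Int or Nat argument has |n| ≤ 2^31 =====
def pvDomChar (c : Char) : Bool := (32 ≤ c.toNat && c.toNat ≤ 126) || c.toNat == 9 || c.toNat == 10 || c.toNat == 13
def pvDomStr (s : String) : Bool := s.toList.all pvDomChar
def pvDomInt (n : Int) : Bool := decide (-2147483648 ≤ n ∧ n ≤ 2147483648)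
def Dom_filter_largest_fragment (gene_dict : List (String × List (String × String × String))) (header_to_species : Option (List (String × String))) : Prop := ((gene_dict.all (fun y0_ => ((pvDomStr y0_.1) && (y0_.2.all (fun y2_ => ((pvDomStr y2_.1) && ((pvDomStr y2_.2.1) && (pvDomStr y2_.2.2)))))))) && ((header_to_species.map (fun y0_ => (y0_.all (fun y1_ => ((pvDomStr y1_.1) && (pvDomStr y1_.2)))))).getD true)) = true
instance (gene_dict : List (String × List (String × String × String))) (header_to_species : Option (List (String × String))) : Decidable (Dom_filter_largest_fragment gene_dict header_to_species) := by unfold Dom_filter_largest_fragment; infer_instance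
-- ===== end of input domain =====

-- B drops A's incremental defaultdict grouping: it lists the truthy keys in first-occurrence
-- order (dict.fromkeys) and takes the max directly over a filter of the entries per key
-- (objective: alternative — no grouping structure is built, at the cost of a rescan per key).

-- shared helper: the key both Pythons compute for an entry's header; none = falsy key (skipped)
def pvKeyOf (header_to_species : Option (List (String × String))) (h : String) : Option String :=
  match header_to_species with
  | none => if h = "" then none else some h
  | some m =>
    if m = [] then (if h = "" then none else some h)
    else match (PySem.Dict.mk m).get? h with
         | none => none
         | some s => if s = "" then none else some s

-- ===== PORT A =====
def filter_largest_fragment (gene_dict : List (String × List (String × String × String))) (header_to_species : Option (List (String × String))) : List (String × List (String × String × String)) :=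
  (gene_dict.foldl (fun nd p =>
      let by_key : PySem.Dict String (List (String × String × String)) :=
        p.2.foldl (fun d e =>
          match pvKeyOf header_to_species e.1 with
          | none => d
          | some k => d.modify k [] (· ++ [e])) PySem.Dict.empty
      let lst : List (String × String × String) :=
        by_key.values.foldl (fun acc g =>
          match PySem.List.max? g (fun x => PySem.Str.len x.2.1) with
          | none => acc            -- unreachable: groups are never empty
          | some m => acc ++ [m]) []
      nd.insert p.1 lst) PySem.Dict.empty).items

-- ===== PORT B =====
def filter_largest_fragment_alt (gene_dict : List (String × List (String × String × String))) (header_to_species : Option (List (String × String))) : List (String × List (String × String × String)) :=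
  (gene_dict.foldl (fun nd p =>
      nd.insert p.1
        ((PySem.List.dedup (p.2.filterMap (fun e => pvKeyOf header_to_species e.1))).map
          (fun k =>
            match PySem.List.max? (p.2.filter (fun e => pvKeyOf header_to_species e.1 == some k))
                    (fun x => PySem.Str.len x.2.1) with
            | some m => m
            | none => ("", "", ""))))   -- unreachable: each key comes from some entry
    PySem.Dict.empty).items

-- ===== PRECONDITION & SPEC =====
def Spec_filter_largest_fragment (gene_dict : List (String × List (String × String × String))) (header_to_species : Option (List (String × String))) (out : List (String × List (String × String × String))) : Prop := out = filter_largest_fragment_alt gene_dict header_to_species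
instance (gene_dict : List (String × List (String × String × String))) (header_to_species : Option (List (String × String))) (out : List (String × List (String × String × String))) : Decidable (Spec_filter_largest_fragment gene_dict header_to_species out) := by unfold Spec_filter_largest_fragment; infer_instance

-- ===== CLAIM (what is proved, stated in full; the proofs are below) =====
def Claim_equal_filter_largest_fragment : Prop := ∀ (gene_dict : List (String × List (String × String × String))) (header_to_species : Option (List (String × String))), Dom_filter_largest_fragment gene_dict header_to_species → Spec_filter_largest_fragment gene_dict header_to_species (filter_largest_fragment gene_dict header_to_species)

-- ===== LEMMAS AND PROOFS =====

-- selection both sides make from a key's group (B's inner match, literally)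
def pvSel (g : List (String × String × String)) : String × String × String :=
  match PySem.List.max? g (fun x => PySem.Str.len x.2.1) with
  | some m => m
  | none => ("", "", "")

-- A's fold over entries IS the plain grouping fold over the keyed entries
theorem pv_fold_eq_group (hts : Option (List (String × String))) (es : List (String × String × String)) :
    ∀ (d : PySem.Dict String (List (String × String × String))), es.foldl (fun d e =>
        match pvKeyOf hts e.1 with
        | none => d
        | some k => d.modify k [] (· ++ [e])) d
      = (es.filterMap (fun e => (pvKeyOf hts e.1).map (fun k => (k, e)))).foldl
          (fun d p => d.modify p.1 [] (· ++ [p.2])) d := by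
  induction es with
  | nil => intro d; rfl
  | cons e t ih =>
    intro d
    cases hk : pvKeyOf hts e.1 <;> simp [hk, ih]

theorem pv_keys_map_fst (hts : Option (List (String × String))) (es : List (String × String × String)) :
    (es.filterMap (fun e => (pvKeyOf hts e.1).map (fun k => (k, e)))).map (·.1)
      = es.filterMap (fun e => pvKeyOf hts e.1) := by
  induction es with
  | nil => rfl
  | cons e t ih => cases hk : pvKeyOf hts e.1 <;> simp [hk, ih]

theorem pv_group_filter (hts : Option (List (String × String))) (es : List (String × String × String)) (k : String) :
    ((es.filterMap (fun e => (pvKeyOf hts e.1).map (fun k => (k, e)))).filter (fun p => p.1 == k)).map (·.2)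
      = es.filter (fun e => pvKeyOf hts e.1 == some k) := by
  induction es with
  | nil => rfl
  | cons e t ih =>
    cases hk : pvKeyOf hts e.1 with
    | none => simp [hk, ih]
    | some k' =>
      by_cases hkk : k' = k <;>
        simp [hk, hkk, ih]

-- A's 'max of each group' loop is a map of pvSel over the (nonempty) groups
theorem pv_values_fold (vs : List (List (String × String × String))) (acc : List (String × String × String))
    (h : ∀ g ∈ vs, g ≠ []) :
    vs.foldl (fun acc g =>
        match PySem.List.max? g (fun x => PySem.Str.len x.2.1) with
        | none => acc
        | some m => acc ++ [m]) acc = acc ++ vs.map pvSel := by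
  induction vs generalizing acc with
  | nil => simp
  | cons g t ih =>
    have hg : g ≠ [] := h g (List.mem_cons_self ..)
    cases hsel : PySem.List.max? g (fun x => PySem.Str.len x.2.1) with
    | none => exact absurd ((PySem.List.max?_eq_none_iff g _).1 hsel) hg
    | some m =>
      have hsg : pvSel g = m := by unfold pvSel; rw [hsel]
      simp only [List.foldl_cons, hsel, List.map_cons, hsg]
      rw [ih _ (fun g' hg' => h g' (List.mem_cons_of_mem _ hg'))]
      simp

-- per-gene equality: A's grouped-max list = B's dedup-keys/filter-max list
theorem pv_gene_eq (hts : Option (List (String × String))) (es : List (String × String × String)) :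
    (es.foldl (fun (d : PySem.Dict String (List (String × String × String))) e =>
        match pvKeyOf hts e.1 with
        | none => d
        | some k => d.modify k [] (· ++ [e])) PySem.Dict.empty).values.foldl
      (fun acc g =>
        match PySem.List.max? g (fun x => PySem.Str.len x.2.1) with
        | none => acc
        | some m => acc ++ [m]) []
    = (PySem.List.dedup (es.filterMap (fun e => pvKeyOf hts e.1))).map
        (fun k => pvSel (es.filter (fun e => pvKeyOf hts e.1 == some k))) := by
  rw [pv_fold_eq_group]
  set l := es.filterMap (fun e => (pvKeyOf hts e.1).map (fun k => (k, e))) with hl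
  set D := l.foldl (fun d p => d.modify p.1 [] (· ++ [p.2])) PySem.Dict.empty with hD
  have hkeys : D.keys = PySem.Set.ofList (l.map (·.1)) := by
    rw [hD, PySem.Dict.keys_foldl_modify_key]
    simp [PySem.Dict.keys_empty, PySem.Set.update_nil_left]
  have hnd : D.keys.Nodup := by rw [hkeys]; exact PySem.Set.nodup_ofList _
  have hgetD : ∀ k, D.getD k [] = (l.filter (fun p => p.1 == k)).map (·.2) := by
    intro k
    rw [hD, PySem.Dict.getD_foldl_modify_append]
    simp [PySem.Dict.getD_empty]
  have hvals : D.values = D.keys.map (fun k => D.getD k []) :=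
    PySem.Dict.values_eq_map_keys D hnd []
  have hne : ∀ g ∈ D.keys.map (fun k => D.getD k []), g ≠ [] := by
    intro g hg
    obtain ⟨k, hk, rfl⟩ := List.mem_map.mp hg
    rw [hgetD]
    intro hnil
    have hkmem : k ∈ l.map (·.1) := by
      rw [hkeys] at hk
      exact (PySem.Set.mem_ofList _ _).1 hk
    obtain ⟨p, hp, hpk⟩ := List.mem_map.mp hkmem
    have hpf : p ∈ l.filter (fun p => p.1 == k) := List.mem_filter.2 ⟨hp, by simp [hpk]⟩
    rw [List.map_eq_nil_iff.mp hnil] at hpf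
    exact absurd hpf (List.not_mem_nil)
  rw [hvals, pv_values_fold _ _ hne, List.nil_append, List.map_map, hkeys, pv_keys_map_fst,
      ← PySem.List.dedup_eq_ofList]
  apply List.map_congr_left
  intro k _
  simp only [Function.comp]
  rw [hgetD, pv_group_filter]

-- ===== VERDICT (by name: the statement is the Claim_ definition above) =====
theorem filter_largest_fragment_spec : Claim_equal_filter_largest_fragment := by
  intro gene_dict hts _
  unfold Spec_filter_largest_fragment filter_largest_fragment filter_largest_fragment_alt
  congr 1
  apply PySem.List.foldl_congr_mem
  intro nd p _
  refine congrArg (fun l => nd.insert p.1 l) ?_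
  rw [pv_gene_eq hts p.2]
  rfl
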